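-- pv_equiv track=rewrite | github.com/Phonlin/schedule-optimizer | algorithms/genetic.py | _run_lengths
-- ===== SOURCE A (Python) =====
-- def _run_lengths(indices: list[int]) -> list[int]:
--     """將連續索引序列拆成各段長度。"""
--     if not indices:
--         return []
--     runs, length = [], 1
--     for i in range(1, len(indices)):
--         if indices[i] == indices[i - 1] + 1:
--             length += 1
--         else:
--             runs.append(length)
--             length = 1
--     runs.append(length)
--     return runs
-- ===== SOURCE B (Python) =====
-- def _run_lengths(indices: list[int]) -> list[int]:
--     """將連續索引序列拆成各段長度。"""
--     if not indices:
--         return []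
--     boundaries = [i for i in range(1, len(indices)) if indices[i] != indices[i - 1] + 1]
--     cuts = [0] + boundaries + [len(indices)]
--     return [cuts[k + 1] - cuts[k] for k in range(len(cuts) - 1)]
-- ===== Notes on version B (the rewrite author's own statement) =====
-- stated objective: alternative
-- what changed: Replaces the running-accumulator flush loop with building the list of break positions, forming a cut list bracketed by zero and the length, and returning successive differences of the cuts.
import Mathlib
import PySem

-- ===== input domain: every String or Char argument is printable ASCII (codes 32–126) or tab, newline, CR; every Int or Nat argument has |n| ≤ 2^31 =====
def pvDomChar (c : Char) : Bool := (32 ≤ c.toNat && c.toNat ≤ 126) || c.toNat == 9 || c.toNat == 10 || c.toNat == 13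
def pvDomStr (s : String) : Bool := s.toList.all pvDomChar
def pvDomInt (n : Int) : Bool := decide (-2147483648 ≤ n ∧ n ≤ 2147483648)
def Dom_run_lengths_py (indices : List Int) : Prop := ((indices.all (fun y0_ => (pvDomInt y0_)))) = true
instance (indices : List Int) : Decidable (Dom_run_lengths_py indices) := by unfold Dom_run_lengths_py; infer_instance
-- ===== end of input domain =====

-- B replaces A's running-accumulator flush loop by a boundary-positions list followed by a
-- differencing pass over the cut list (objective: alternative decomposition, same cost).

-- ===== PORT A =====
def run_lengths_py (indices : List Int) : List Int :=
  if indices = [] then []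
  else
    let st := (PySem.List.pyRange 1 (indices.length : Int) 1).foldl
      (fun (st : List Int × Int) i =>
        if PySem.List.pyGetD indices i 0 = PySem.List.pyGetD indices (i - 1) 0 + 1
        then (st.1, st.2 + 1)
        else (st.1 ++ [st.2], 1)) ([], 1)
    st.1 ++ [st.2]

-- ===== PORT B =====
def run_lengths_py_alt (indices : List Int) : List Int :=
  if indices = [] then []
  else
    let boundaries := (PySem.List.pyRange 1 (indices.length : Int) 1).filter
      (fun i => !(PySem.List.pyGetD indices i 0 == PySem.List.pyGetD indices (i - 1) 0 + 1))
    let cuts := [0] ++ boundaries ++ [(indices.length : Int)]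
    (PySem.List.pyRange 0 ((cuts.length : Int) - 1) 1).map
      (fun k => PySem.List.pyGetD cuts (k + 1) 0 - PySem.List.pyGetD cuts k 0)

-- ===== PRECONDITION & SPEC =====
def Spec_run_lengths_py (indices : List Int) (out : List Int) : Prop := out = run_lengths_py_alt indices
instance (indices : List Int) (out : List Int) : Decidable (Spec_run_lengths_py indices out) := by unfold Spec_run_lengths_py; infer_instance

-- ===== CLAIM (what is proved, stated in full; the proofs are below) =====
def Claim_equal_run_lengths_py : Prop := ∀ (indices : List Int), Dom_run_lengths_py indices → Spec_run_lengths_py indices (run_lengths_py indices)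

-- ===== LEMMAS AND PROOFS =====

/-- successive differences of a cut list, previous cut `p`. -/
def pvDiffs (p : Int) : List Int → List Int
  | [] => []
  | c :: cs => (c - p) :: pvDiffs c cs

theorem pvDiffs_append_singleton (p e : Int) (l : List Int) :
    pvDiffs p (l ++ [e]) = pvDiffs p l ++ [e - l.getLastD p] := by
  induction l generalizing p with
  | nil => simp [pvDiffs]
  | cons c cs ih =>
    simp [pvDiffs, ih c]
    cases cs <;> simp [List.getLast?_cons]

theorem pvGetD_diffs (cs : List Int) (c : Int) :
    (List.range cs.length).map (fun k => (c :: cs).getD (k + 1) 0 - (c :: cs).getD k 0)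
      = pvDiffs c cs := by
  induction cs generalizing c with
  | nil => simp [pvDiffs]
  | cons d ds ih =>
    have hh : ((fun k => (c :: d :: ds).getD (k + 1) 0 - (c :: d :: ds).getD k 0) ∘ Nat.succ)
        = (fun k => (d :: ds).getD (k + 1) 0 - (d :: ds).getD k 0) := by
      funext k; simp [Function.comp]
    rw [List.length_cons, List.range_succ_eq_map, List.map_cons, List.map_map, hh, ih d]
    simp [pvDiffs]

/-- B's differencing pass over any nonempty cut list computes `pvDiffs`. -/
theorem pvMap_diffs (c : Int) (cs : List Int) :
    (PySem.List.pyRange 0 (((c :: cs).length : Int) - 1) 1).map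
      (fun k => PySem.List.pyGetD (c :: cs) (k + 1) 0 - PySem.List.pyGetD (c :: cs) k 0)
      = pvDiffs c cs := by
  have h : (((c :: cs).length : Int) - 1) = ((cs.length : Nat) : Int) := by push_cast [List.length_cons]; ring
  rw [h, PySem.List.pyRange_zero_natCast, List.map_map]
  have hc : ∀ (k : Nat), ((k : Int) + 1) = (((k + 1 : Nat)) : Int) := by intro k; push_cast; ring
  simp only [Function.comp_def, hc, PySem.List.pyGetD_natCast]
  exact pvGetD_diffs cs c

/-- loop invariant relating A's fold state to B's boundary list on range `1..m`. -/
theorem pvInv (xs : List Int) (m : Nat) (h1 : 1 ≤ m) :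
    ((PySem.List.pyRange 1 (m : Int) 1).foldl
      (fun (st : List Int × Int) i =>
        if PySem.List.pyGetD xs i 0 = PySem.List.pyGetD xs (i - 1) 0 + 1
        then (st.1, st.2 + 1)
        else (st.1 ++ [st.2], 1)) ([], 1))
    = (pvDiffs 0 ((PySem.List.pyRange 1 (m : Int) 1).filter
        (fun i => !(PySem.List.pyGetD xs i 0 == PySem.List.pyGetD xs (i - 1) 0 + 1))),
       (m : Int) - ((PySem.List.pyRange 1 (m : Int) 1).filter
        (fun i => !(PySem.List.pyGetD xs i 0 == PySem.List.pyGetD xs (i - 1) 0 + 1))).getLastD 0) := by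
  induction m, h1 using Nat.le_induction with
  | base =>
    rw [PySem.List.pyRange_one_eq_nil (by norm_num)]
    simp [pvDiffs]
  | succ m hm ih =>
    have hcast : (((m + 1 : Nat)) : Int) = (m : Int) + 1 := by push_cast; ring
    rw [hcast, PySem.List.pyRange_one_succ_right (by exact_mod_cast hm), List.foldl_append,
      List.filter_append, ih]
    by_cases hP : PySem.List.pyGetD xs (m : Int) 0 = PySem.List.pyGetD xs ((m : Int) - 1) 0 + 1
    · simp [hP]
      ring
    · have hb : (!(PySem.List.pyGetD xs (m : Int) 0 == PySem.List.pyGetD xs ((m : Int) - 1) 0 + 1)) = true := by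
        simpa using hP
      simp only [List.foldl_cons, List.foldl_nil, List.filter_cons, List.filter_nil, hb,
        if_neg hP, if_true]
      rw [pvDiffs_append_singleton]
      simp

-- ===== VERDICT (by name: the statement is the Claim_ definition above) =====
theorem run_lengths_py_spec : Claim_equal_run_lengths_py := by
  intro xs _
  unfold Spec_run_lengths_py run_lengths_py run_lengths_py_alt
  by_cases hxs : xs = []
  · simp [hxs]
  · simp only [hxs, ite_false]
    have hlen : 1 ≤ xs.length := List.length_pos_iff.mpr hxs
    rw [pvInv xs xs.length hlen]
    rw [show ([(0:Int)] ++ _ ++ [(xs.length : Int)]) = (0 :: (((PySem.List.pyRange 1 (xs.length : Int) 1).filter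
        (fun i => !(PySem.List.pyGetD xs i 0 == PySem.List.pyGetD xs (i - 1) 0 + 1))) ++ [(xs.length : Int)])) from by simp]
    rw [pvMap_diffs, pvDiffs_append_singleton]
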